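-- pv_equiv track=rewrite | github.com/ismaeljda/travel_planner | app_old.py | _organize_amadeus_activities
-- ===== SOURCE A (Python) =====
-- def _organize_amadeus_activities(activities):
--     """Organize Amadeus activities by category"""
--     organized = {
--         'gastronomie': [],
--         'culture': [],
--         'nature': [],
--         'loisirs': [],
--         'detente': []
--     }
--
--     for activity in activities:
--         category = activity.get('category', 'culture')
--         if category in organized:
--             organized[category].append(activity)
--
--     return organized
-- ===== SOURCE B (Python) =====
-- def _organize_amadeus_activities(activities):
--     """Organize Amadeus activities by category"""
--     acts = list(activities)
--     return {cat: [a for a in acts if a.get('category', 'culture') == cat]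
--             for cat in ['gastronomie', 'culture', 'nature', 'loisirs', 'detente']}
-- ===== Notes on version B (the rewrite author's own statement) =====
-- stated objective: idiomatic
-- what changed: Replaces the single dispatch-and-append pass into a pre-built 5-bucket dict by a dict comprehension over the fixed key list, one independent filter scan per category.
import Mathlib
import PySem

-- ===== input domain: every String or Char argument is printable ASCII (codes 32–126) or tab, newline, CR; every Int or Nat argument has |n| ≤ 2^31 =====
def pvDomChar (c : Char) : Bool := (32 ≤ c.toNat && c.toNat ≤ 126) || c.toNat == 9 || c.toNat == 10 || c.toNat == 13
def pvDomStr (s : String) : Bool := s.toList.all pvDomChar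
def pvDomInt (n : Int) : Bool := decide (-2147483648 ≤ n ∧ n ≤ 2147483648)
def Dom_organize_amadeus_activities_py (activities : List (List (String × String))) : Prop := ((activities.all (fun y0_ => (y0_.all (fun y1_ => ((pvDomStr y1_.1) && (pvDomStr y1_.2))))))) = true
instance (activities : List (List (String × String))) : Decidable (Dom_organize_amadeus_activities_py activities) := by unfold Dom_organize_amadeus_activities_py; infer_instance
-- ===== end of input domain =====

-- B replaces A's single dispatch-and-append pass by a dict comprehension over the
-- fixed category list, one independent filter scan per category (idiomatic, same cost).


-- shared: activity.get('category', 'culture') on the activity dict (first-match assoc lookup)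
def pvGetCat (activity : List (String × String)) : String :=
  (PySem.Dict.mk activity).getD "category" "culture"

-- ===== PORT A =====
def organize_amadeus_activities_py (activities : List (List (String × String))) : List (String × List (List (String × String))) :=
  let organized : PySem.Dict String (List (List (String × String))) :=
    PySem.Dict.ofList
      [("gastronomie", []), ("culture", []), ("nature", []), ("loisirs", []), ("detente", [])]
  (activities.foldl (fun organized activity =>
      let category := pvGetCat activity
      if organized.contains category then
        organized.modify category [] (fun l => l ++ [activity])
      else organized) organized).items

-- ===== PORT B =====
def organize_amadeus_activities_py_alt (activities : List (List (String × String))) : List (String × List (List (String × String))) :=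
  ["gastronomie", "culture", "nature", "loisirs", "detente"].map
    (fun cat => (cat, activities.filter (fun a => pvGetCat a == cat)))

-- ===== PRECONDITION & SPEC =====
def Spec_organize_amadeus_activities_py (activities : List (List (String × String))) (out : List (String × List (List (String × String)))) : Prop := out = organize_amadeus_activities_py_alt activities
instance (activities : List (List (String × String))) (out : List (String × List (List (String × String)))) : Decidable (Spec_organize_amadeus_activities_py activities out) := by unfold Spec_organize_amadeus_activities_py; infer_instance

-- ===== CLAIM (what is proved, stated in full; the proofs are below) =====
def Claim_equal_organize_amadeus_activities_py : Prop := ∀ (activities : List (List (String × String))), Dom_organize_amadeus_activities_py activities → Spec_organize_amadeus_activities_py activities (organize_amadeus_activities_py activities)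

-- ===== LEMMAS AND PROOFS =====

-- the loop body of A
def pvStep (d : PySem.Dict String (List (List (String × String)))) (a : List (String × String)) :
    PySem.Dict String (List (List (String × String))) :=
  if d.contains (pvGetCat a) then d.modify (pvGetCat a) [] (fun l => l ++ [a]) else d

lemma pvStep_keys (d : PySem.Dict String (List (List (String × String)))) (a : List (String × String)) :
    (pvStep d a).keys = d.keys := by
  unfold pvStep
  split_ifs with h
  · rw [PySem.Dict.keys_modify]
    simp [PySem.Dict.keys_insert_of_contains, h]
  · rfl

lemma pvStep_contains (d : PySem.Dict String (List (List (String × String)))) (a : List (String × String)) (c : String) :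
    (pvStep d a).contains c = d.contains c := by
  rw [PySem.Dict.contains_eq_decide_mem_keys, PySem.Dict.contains_eq_decide_mem_keys, pvStep_keys]

lemma pvLoop_keys (acts : List (List (String × String))) (d : PySem.Dict String (List (List (String × String)))) :
    (acts.foldl pvStep d).keys = d.keys := by
  induction acts generalizing d with
  | nil => rfl
  | cons a rest ih => rw [List.foldl_cons, ih, pvStep_keys]

lemma pvLoop_getD (acts : List (List (String × String)))
    (d : PySem.Dict String (List (List (String × String)))) (c : String)
    (hc : d.contains c = true) :
    (acts.foldl pvStep d).getD c [] = d.getD c [] ++ acts.filter (fun a => pvGetCat a == c) := by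
  induction acts generalizing d with
  | nil => simp
  | cons a rest ih =>
    rw [List.foldl_cons, ih (pvStep d a) (by rw [pvStep_contains]; exact hc)]
    unfold pvStep
    by_cases hac : pvGetCat a = c
    · subst hac
      rw [if_pos hc, PySem.Dict.getD_modify_self]
      simp
    · split_ifs with h
      · rw [PySem.Dict.getD_modify, if_neg (fun e => hac e.symm)]
        simp [hac]
      · simp [hac]

theorem pv_main (activities : List (List (String × String))) :
    organize_amadeus_activities_py activities = organize_amadeus_activities_py_alt activities := by
  set d0 : PySem.Dict String (List (List (String × String))) :=
    PySem.Dict.ofList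
      [("gastronomie", []), ("culture", []), ("nature", []), ("loisirs", []), ("detente", [])] with hd0
  have hA : organize_amadeus_activities_py activities = (activities.foldl pvStep d0).items := rfl
  rw [hA]
  unfold organize_amadeus_activities_py_alt
  have hkeys : (activities.foldl pvStep d0).keys = ["gastronomie", "culture", "nature", "loisirs", "detente"] := by
    rw [pvLoop_keys]; rfl
  have hnd : (activities.foldl pvStep d0).keys.Nodup := by rw [hkeys]; decide
  rw [PySem.Dict.items_eq_map_keys _ hnd ([] : List (List (String × String))), hkeys]
  refine List.map_congr_left ?_
  intro c hc
  have hcont : d0.contains c = true := by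
    fin_cases hc <;> decide
  rw [pvLoop_getD activities d0 c hcont]
  have : d0.getD c [] = [] := by fin_cases hc <;> decide
  rw [this]; rfl

-- ===== VERDICT (by name: the statement is the Claim_ definition above) =====
theorem organize_amadeus_activities_py_spec : Claim_equal_organize_amadeus_activities_py := by
  intro activities _
  unfold Spec_organize_amadeus_activities_py
  exact pv_main activities
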